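-- pv_equiv track=rewrite | github.com/adolfotcar/foo.bar.ai | 3 - The Grandest Staircase Of Them All/bing_precise.py | solution
-- ===== SOURCE A (Python) =====
-- def solution(n):
--     dp = [[0 for _ in range(n+1)] for _ in range(n+1)]
--     dp[0][0] = 1
--     for last in range(1, n+1):
--         for left in range(0, n+1):
--             dp[last][left] = dp[last-1][left]
--             if left >= last:
--                 dp[last][left] += dp[last-1][left-last]
--     ans = 0
--     for i in range(1, n+1):
--         ans += dp[i][n-i]
--     return ans
-- ===== SOURCE B (Python) =====
-- def solution(n):
--     # Counts by NUMBER of steps instead of by allowed step heights: each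
--     # staircase counted by A corresponds (add 1 to the top step) to a set of k
--     # distinct positive integers summing to n+1, and sets of k distinct parts
--     # biject (subtract the staircase 0,1,...,k-1) with ordinary partitions of
--     # n+1-k(k-1)/2 into exactly k parts.  Since k(k+1)/2 <= n+1 forces
--     # k = O(sqrt(n)), the table has only O(n*sqrt(n)) cells instead of A's O(n^2).
--     if n <= 0:
--         return 0
--     ans = 1  # k = 1: the single staircase {n} itself
--     prev = [1] + [0] * n  # partitions into exactly 0 parts
--     k = 1
--     while True:
--         shift = (k - 2) * (k + 1) // 2
--         if k >= 2 and n - shift < k: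
--             break
--         cur = [0] * (n + 1)
--         for j in range(k, n + 1):
--             cur[j] = prev[j - 1] + cur[j - k]
--         if k >= 2:
--             ans += cur[n - shift]
--         prev = cur
--         k += 1
--     return ans
-- ===== Notes on version B (the rewrite author's own statement) =====
-- stated objective: faster
-- what changed: Counts staircases by number of steps instead of A's O(n^2) subset-sum DP over step heights: each staircase maps to k distinct parts of n+1, which biject (subtract the staircase 0..k-1) with partitions of a shifted total into exactly k parts, so only k = O(sqrt(n)) rows of a partition-count table are needed.
import Mathlib
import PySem

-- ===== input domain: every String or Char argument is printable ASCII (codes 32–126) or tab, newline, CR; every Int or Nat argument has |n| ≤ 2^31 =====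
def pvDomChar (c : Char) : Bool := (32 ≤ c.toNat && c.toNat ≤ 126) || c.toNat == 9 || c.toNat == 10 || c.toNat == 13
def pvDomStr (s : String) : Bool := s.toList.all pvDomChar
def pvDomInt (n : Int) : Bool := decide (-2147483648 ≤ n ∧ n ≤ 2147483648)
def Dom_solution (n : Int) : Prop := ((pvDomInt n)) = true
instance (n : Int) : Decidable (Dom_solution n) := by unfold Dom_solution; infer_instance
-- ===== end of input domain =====

-- B counts staircases by NUMBER of steps (partitions of a shifted total into exactly k
-- parts, k = O(sqrt n)) instead of A's subset-sum DP over all step heights; the timing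
-- run measured B faster (O(n*sqrt n) table instead of A's O(n^2) table).

-- ===== PORT A =====
-- Literal port of A. All list indices are provably in range under Pre_ (0 ≤ n),
-- so Python's xs[i] / xs[i] = v are ported as List.getD / List.set on Nat indices
-- (exact there). Python's in-place element writes into row `last` only ever read
-- row `last-1`, so building the new row by successive `set`s is the same computation.
def solution (n : Int) : Int :=
  let N := n.toNat
  let dp0 : List (List Int) := List.replicate (N+1) (List.replicate (N+1) 0)
  let dp1 := dp0.set 0 ((dp0.getD 0 []).set 0 1)          -- dp[0][0] = 1
  let dp := (List.range' 1 N).foldl (fun dp last =>       -- for last in range(1, n+1)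
      dp.set last ((List.range (N+1)).foldl (fun row left =>   -- for left in range(0, n+1)
          let v := (dp.getD (last-1) []).getD left 0           -- dp[last][left] = dp[last-1][left]
          let v := if left ≥ last then v + (dp.getD (last-1) []).getD (left - last) 0 else v
          row.set left v) (dp.getD last []))) dp1
  (List.range' 1 N).foldl (fun ans i => ans + (dp.getD i []).getD (N - i) 0) 0

-- ===== PORT B =====
-- Literal port of Source B.  The inner `for j in range(k, n+1): cur[j] = prev[j-1] + cur[j-k]`
-- (in-place, reading already-written entries of cur) is the fold below; the `while True`
-- loop is the well-founded recursion bLoop (it terminates because continuing implies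
-- k <= n, proved in decreasing_by).
def bRow (N k : Nat) (prev : List Int) : List Int :=
  (List.range' k (N+1-k)).foldl
    (fun row j => row.set j (prev.getD (j-1) 0 + row.getD (j-k) 0))
    (List.replicate (N+1) 0)

def bLoop (N k : Nat) (prev : List Int) (ans : Int) : Int :=
  if 2 ≤ k ∧ N - (k-2)*(k+1)/2 < k then ans
  else
    let cur := bRow N k prev
    let ans' := if 2 ≤ k then ans + cur.getD (N - (k-2)*(k+1)/2) 0 else ans
    bLoop N (k+1) cur ans'
termination_by N + 3 - k
decreasing_by
  rename_i h
  by_cases hk : 2 ≤ k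
  · have h2 : k ≤ N - (k-2)*(k+1)/2 := Nat.le_of_not_lt (fun hh => h ⟨hk, hh⟩)
    have h3 : k ≤ N := le_trans h2 (Nat.sub_le _ _)
    omega
  · omega

def solution_alt (n : Int) : Int :=
  if n ≤ 0 then 0
  else bLoop n.toNat 1 (1 :: List.replicate n.toNat 0) 1

-- ===== PRECONDITION & SPEC =====
-- A raises IndexError (dp[0][0] on an empty table) for n < 0; Pre_ excludes exactly that.
def Pre_solution (n : Int) : Prop := 0 ≤ n
instance (n : Int) : Decidable (Pre_solution n) := by unfold Pre_solution; infer_instance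
def pvWitness_solution : Int := (5)

def Spec_solution (n : Int) (out : Int) : Prop := out = solution_alt n
instance (n : Int) (out : Int) : Decidable (Spec_solution n out) := by unfold Spec_solution; infer_instance

-- ===== CLAIM (what is proved, stated in full; the proofs are below) =====
def Claim_equal_solution : Prop := ∀ (n : Int), Dom_solution n → Pre_solution n → Spec_solution n (solution n)

-- ===== LEMMAS AND PROOFS =====

-- Q last left = number of subsets of {1..last} summing to `left` (A's dp entry).
def Q : Nat → Nat → Int
  | 0, 0 => 1
  | 0, _+1 => 0
  | (l+1), c => Q l c + if l+1 ≤ c then Q l (c - (l+1)) else 0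

def qrow (k N : Nat) : List Int := (List.range (N+1)).map (Q k)

lemma qrow_length (k N : Nat) : (qrow k N).length = N + 1 := by
  simp [qrow]

lemma qrow_getD (k N c : Nat) (h : c ≤ N) : (qrow k N).getD c 0 = Q k c := by
  simp [qrow, List.getD_eq_getElem?_getD, List.getElem?_map, List.getElem?_range (by omega : c < N+1)]

lemma qrow_zero (N : Nat) : qrow 0 N = 1 :: List.replicate N 0 := by
  apply List.ext_getElem (by simp [qrow_length])
  intro i h1 h2
  simp only [qrow, List.getElem_map, List.getElem_range]
  cases i with
  | zero => simp [Q]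
  | succ j =>
    simp only [List.getElem_cons_succ]
    rw [List.getElem_replicate]
    rfl

lemma foldl_range'_sum (f : Nat → Int) : ∀ N, (List.range' 1 N).foldl (fun a i => a + f i) 0
    = ∑ i ∈ Finset.range N, f (i+1) := by
  intro N
  induction N with
  | zero => simp
  | succ N ih =>
    rw [List.range'_concat, List.foldl_append, ih, Finset.sum_range_succ]
    simp [Nat.add_comm]

-- ---------- A side: the ports' folds compute Σ_{i=1}^{N} Q i (N-i) ----------

lemma inner_sets (f : Nat → Int) :
    ∀ (m : Nat) (row : List Int), m ≤ row.length →
      (List.range m).foldl (fun r l => r.set l (f l)) row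
        = (List.range m).map f ++ row.drop m := by
  intro m
  induction m with
  | zero => intro row _; simp
  | succ m ih =>
    intro row h
    rw [List.range_succ, List.foldl_append, ih row (by omega)]
    simp only [List.foldl_cons, List.foldl_nil, List.map_append, List.map_cons, List.map_nil]
    have hlen : ((List.range m).map f).length = m := by simp
    have hdrop : row.drop m = row[m] :: row.drop (m+1) := List.drop_eq_getElem_cons (by omega)
    rw [hdrop, List.set_append_right _ _ (by omega), hlen, Nat.sub_self]
    simp only [List.set_cons_zero, List.append_assoc, List.cons_append, List.nil_append]

def dpa (k N : Nat) : List (List Int) :=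
  (List.range (N+1)).map (fun r => if r ≤ k then qrow r N else List.replicate (N+1) 0)

lemma dpa_length (k N : Nat) : (dpa k N).length = N + 1 := by simp [dpa]

lemma dpa_getD (k N r : Nat) (h : r ≤ N) :
    (dpa k N).getD r [] = if r ≤ k then qrow r N else List.replicate (N+1) 0 := by
  simp [dpa, List.getD_eq_getElem?_getD, List.getElem?_map, List.getElem?_range (by omega : r < N+1)]

lemma dpa_zero (N : Nat) :
    dpa 0 N = (List.replicate (N+1) (List.replicate (N+1) 0)).set 0
        (((List.replicate (N+1) (List.replicate (N+1) 0)).getD 0 []).set 0 1) := by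
  apply List.ext_getElem (by simp [dpa_length])
  intro i h1 h2
  have h0 : (List.replicate (N+1) (List.replicate (N+1) 0) : List (List Int)).getD 0 []
      = List.replicate (N+1) (0:Int) := by
    simp [List.getD_eq_getElem?_getD]
  rw [h0]
  simp only [dpa, List.getElem_map, List.getElem_range]
  rcases i with _ | j
  · simp [qrow_zero]
    cases N <;> simp [List.replicate_succ]
  · simp [List.getElem_replicate]

lemma a_inner (k N : Nat) (hk : k + 1 ≤ N) :
    (List.range (N+1)).foldl (fun row left =>
        row.set left
          (if left ≥ k+1 then
              ((dpa k N).getD (k+1-1) []).getD left 0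
                + ((dpa k N).getD (k+1-1) []).getD (left - (k+1)) 0
            else ((dpa k N).getD (k+1-1) []).getD left 0))
      ((dpa k N).getD (k+1) []) = qrow (k+1) N := by
  have hprev : (dpa k N).getD (k+1-1) [] = qrow k N := by
    rw [Nat.add_sub_cancel, dpa_getD k N k (by omega)]; simp
  have hinit : (dpa k N).getD (k+1) [] = List.replicate (N+1) 0 := by
    rw [dpa_getD k N (k+1) hk]; simp
  rw [hprev, hinit]
  rw [show (fun (row : List Int) (left : Nat) => row.set left
        (if left ≥ k+1 then (qrow k N).getD left 0 + (qrow k N).getD (left - (k+1)) 0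
          else (qrow k N).getD left 0))
      = (fun (row : List Int) (left : Nat) => row.set left
          ((qrow k N).getD left 0 + if k+1 ≤ left then (qrow k N).getD (left - (k+1)) 0 else 0))
    from by funext row left; by_cases h : k+1 ≤ left <;> simp [h]]
  rw [inner_sets _ (N+1) (List.replicate (N+1) 0) (by simp)]
  simp only [List.drop_replicate, Nat.sub_self, List.replicate_zero, List.append_nil]
  apply List.ext_getElem (by simp [qrow_length])
  intro i h1 h2
  have hi : i ≤ N := by
    have := h2; rw [qrow_length] at this; omega
  simp only [List.getElem_map, List.getElem_range]
  rw [show (qrow (k+1) N)[i] = Q (k+1) i from by simp [qrow]]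
  rw [qrow_getD k N i hi]
  by_cases h : k+1 ≤ i
  · rw [if_pos h, qrow_getD k N (i - (k+1)) (by omega)]
    simp [Q, h]
  · simp [Q, h]

lemma a_outer (N : Nat) : ∀ (k : Nat), k ≤ N →
    (List.range' 1 k).foldl (fun dp last =>
        dp.set last ((List.range (N+1)).foldl (fun row left =>
            row.set left
              (if left ≥ last then
                  (dp.getD (last-1) []).getD left 0 + (dp.getD (last-1) []).getD (left - last) 0
                else (dp.getD (last-1) []).getD left 0))
          (dp.getD last []))) (dpa 0 N) = dpa k N := by
  intro k
  induction k with
  | zero => intro _; simp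
  | succ k ih =>
    intro hk
    rw [List.range'_concat, List.foldl_append, ih (by omega)]
    simp only [List.foldl_cons, List.foldl_nil]
    rw [show 1 + 1 * k = k + 1 from by omega, a_inner k N hk]
    apply List.ext_getElem (by simp [dpa_length])
    intro i h1 h2
    have hi : i ≤ N := by
      have := h2; rw [dpa_length] at this; omega
    rw [List.getElem_set]
    simp only [dpa, List.getElem_map, List.getElem_range]
    by_cases h : k + 1 = i
    · subst h; simp
    · have : (i ≤ k) = (i ≤ k + 1) := by
        by_cases hik : i ≤ k <;> simp [hik] <;> omega
      simp [h, this]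

-- A's value, as a Finset sum.
lemma a_value (n : Int) : solution n
    = ∑ i ∈ Finset.range n.toNat, Q (i+1) (n.toNat - (i+1)) := by
  show solution n = _
  unfold solution
  set N := n.toNat with hN
  simp only [ge_iff_le]
  rw [← dpa_zero N]
  rw [show (fun (dp : List (List Int)) (last : Nat) =>
        dp.set last ((List.range (N+1)).foldl (fun row left =>
            let v := (dp.getD (last-1) []).getD left 0
            let v := if last ≤ left then v + (dp.getD (last-1) []).getD (left - last) 0 else v
            row.set left v) (dp.getD last [])))
      = (fun (dp : List (List Int)) (last : Nat) =>
        dp.set last ((List.range (N+1)).foldl (fun row left =>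
            row.set left
              (if left ≥ last then
                  (dp.getD (last-1) []).getD left 0 + (dp.getD (last-1) []).getD (left - last) 0
                else (dp.getD (last-1) []).getD left 0))
          (dp.getD last []))) from by
      funext dp last
      rw [show (fun (row : List Int) (left : Nat) =>
            let v := (dp.getD (last-1) []).getD left 0
            let v := if last ≤ left then v + (dp.getD (last-1) []).getD (left - last) 0 else v
            row.set left v)
          = (fun (row : List Int) (left : Nat) =>
            row.set left
              (if left ≥ last then
                  (dp.getD (last-1) []).getD left 0 + (dp.getD (last-1) []).getD (left - last) 0
                else (dp.getD (last-1) []).getD left 0)) from by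
        funext row left; by_cases h : last ≤ left <;> simp [h]]]
  rw [a_outer N N (le_refl N)]
  -- turn the final foldl into the Finset sum
  have hcong : (List.range' 1 N).foldl
        (fun ans i => ans + ((dpa N N).getD i []).getD (N-i) 0) 0
      = (List.range' 1 N).foldl (fun ans i => ans + Q i (N-i)) 0 := by
    apply PySem.List.foldl_congr_mem
    intro acc x hx
    have hx' := List.mem_range'_1.mp hx
    rw [dpa_getD N N x (by omega), if_pos (by omega : x ≤ N), qrow_getD x N (N-x) (by omega)]
  rw [hcong, foldl_range'_sum (fun i => Q i (N-i)) N]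

-- ---------- the refined counter: cNum i k m = #(size-k subsets of {1..i} with sum m) ----------
-- (defined purely by its recurrence; k and m are Ints, negative arguments count 0)
def cNum : Nat → Int → Int → Int
  | 0, k, m => if k = 0 ∧ m = 0 then 1 else 0
  | (i+1), k, m => cNum i k m + cNum i (k-1) (m - (i+1 : Int))

def sNum (k m : Int) : Int := cNum m.toNat k m

lemma cNum_mneg : ∀ (i : Nat) (k m : Int), m < 0 → cNum i k m = 0 := by
  intro i
  induction i with
  | zero => intro k m hm; simp [cNum]; omega
  | succ i ih =>
    intro k m hm
    simp only [cNum]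
    rw [ih k m hm, ih (k-1) (m - (i+1:Int)) (by omega)]
    ring

lemma cNum_kneg : ∀ (i : Nat) (k m : Int), k < 0 → cNum i k m = 0 := by
  intro i
  induction i with
  | zero => intro k m hk; simp [cNum]; omega
  | succ i ih =>
    intro k m hk
    simp only [cNum]
    rw [ih k m hk, ih (k-1) _ (by omega)]
    ring

lemma cNum_kbig : ∀ (i : Nat) (k m : Int), (i : Int) < k → cNum i k m = 0 := by
  intro i
  induction i with
  | zero => intro k m hk; simp [cNum]; omega
  | succ i ih =>
    intro k m hk
    simp only [cNum]
    rw [ih k m (by push_cast at hk ⊢; omega), ih (k-1) _ (by push_cast at hk ⊢; omega)]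
    ring

-- the minimum possible sum of k distinct positive integers is k(k+1)/2
lemma cNum_vanish : ∀ (i : Nat) (k m : Int), 2*m < k*(k+1) → cNum i k m = 0 := by
  intro i
  induction i with
  | zero =>
    intro k m h
    simp only [cNum, ite_eq_right_iff]
    rintro ⟨hk, hm⟩; subst hk; subst hm; omega
  | succ i ih =>
    intro k m h
    simp only [cNum]
    rw [ih k m h]
    by_cases hk : k ≤ (i:Int) + 1
    · rw [ih (k-1) (m - (i+1:Int)) (by nlinarith)]
      ring
    · rw [cNum_kbig i (k-1) _ (by omega)]
      ring

lemma cNum_zero : ∀ (i : Nat) (m : Int), cNum i 0 m = if m = 0 then 1 else 0 := by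
  intro i
  induction i with
  | zero => intro m; simp [cNum]
  | succ i ih =>
    intro m
    simp only [cNum]
    rw [ih m, cNum_kneg i (0-1) _ (by omega)]
    ring

lemma cNum_one : ∀ (i : Nat) (m : Int), cNum i 1 m = if 1 ≤ m ∧ m ≤ (i:Int) then 1 else 0 := by
  intro i
  induction i with
  | zero => intro m; simp [cNum]; omega
  | succ i ih =>
    intro m
    simp only [cNum]
    rw [ih m]
    rw [show (1:Int) - 1 = 0 from by ring, cNum_zero]
    push_cast
    split_ifs <;> omega

-- R2: the subtract-one-from-every-element recurrence, proved from R1 by induction.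
lemma cNum_R2 : ∀ (i : Nat) (k m : Int),
    cNum (i+1) k m = cNum i k (m-k) + cNum i (k-1) (m-k) := by
  intro i
  induction i with
  | zero =>
    intro k m
    simp only [cNum]
    push_cast
    split_ifs <;> omega
  | succ i ih =>
    intro k m
    have e1 : cNum (i+1+1) k m
        = cNum (i+1) k m + cNum (i+1) (k-1) (m - (i+1+1 : Int)) := by
      simp only [cNum]; push_cast; ring_nf
    rw [e1, ih k m, ih (k-1) (m - (i+1+1:Int))]
    have e2 : cNum (i+1) k (m-k) = cNum i k (m-k) + cNum i (k-1) (m-k-(i+1:Int)) := by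
      simp only [cNum]
    have e3 : cNum (i+1) (k-1) (m-k) = cNum i (k-1) (m-k) + cNum i (k-1-1) (m-k-(i+1:Int)) := by
      simp only [cNum]
    rw [e2, e3]
    rw [show m - (i+1+1:Int) - (k-1) = m - k - (i+1:Int) from by ring]
    ring

lemma cNum_stab : ∀ (i : Nat) (k m : Int), m.toNat ≤ i → cNum i k m = sNum k m := by
  intro i
  induction i with
  | zero =>
    intro k m h
    unfold sNum
    rw [Nat.le_zero.mp h]
  | succ i ih =>
    intro k m h
    rcases Nat.lt_or_ge i m.toNat with hlt | hle
    · have : m.toNat = i + 1 := by omega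
      unfold sNum; rw [this]
    · simp only [cNum]
      rw [ih k m hle, cNum_mneg i (k-1) (m - (i+1:Int)) (by omega)]
      ring

lemma sNum_rec (k m : Int) (hk : 0 ≤ k) :
    sNum k m = sNum k (m-k) + sNum (k-1) (m-k) := by
  have h1 : cNum (m.toNat + 1) k m = sNum k m := cNum_stab _ k m (by omega)
  rw [← h1, cNum_R2]
  rw [cNum_stab m.toNat k (m-k) (by omega), cNum_stab m.toNat (k-1) (m-k) (by omega)]

-- telescoping R1: c (t) (k+1) (N+1) = Σ_{i<t} c i k (N-i)
lemma cNum_tele (k : Int) (N : Nat) : ∀ (t : Nat),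
    cNum t (k+1) ((N:Int)+1) = ∑ i ∈ Finset.range t, cNum i k ((N:Int) - i) := by
  intro t
  induction t with
  | zero => simp [cNum]; omega
  | succ t ih =>
    rw [Finset.sum_range_succ, ← ih]
    simp only [cNum]
    rw [show (N:Int) + 1 - (t+1:Int) = (N:Int) - t from by ring,
        show k + 1 - 1 = k from by ring]

-- Q in terms of cNum
lemma Q_eq_sum_cNum : ∀ (i : Nat) (m : Nat),
    Q i m = ∑ k ∈ Finset.range (i+1), cNum i (k:Int) (m:Int) := by
  intro i
  induction i with
  | zero =>
    intro m
    simp only [cNum]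
    cases m <;> simp [Q]
  | succ i ih =>
    intro m
    have hsplit : ∀ k : Nat, cNum (i+1) (k:Int) (m:Int)
        = cNum i (k:Int) (m:Int) + cNum i ((k:Int)-1) ((m:Int) - (i+1:Int)) := by
      intro k; simp only [cNum]
    simp only [hsplit]
    rw [Finset.sum_add_distrib]
    have h1 : ∑ k ∈ Finset.range (i+2), cNum i (k:Int) (m:Int) = Q i m := by
      rw [Finset.sum_range_succ, cNum_kbig i (i+1:Nat) _ (by push_cast; omega), ih m]
      ring
    have h2 : ∑ k ∈ Finset.range (i+2), cNum i ((k:Int)-1) ((m:Int) - (i+1:Int))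
        = if i+1 ≤ m then Q i (m - (i+1)) else 0 := by
      rw [Finset.sum_range_succ']
      have hz : cNum i (((0:Nat):Int)-1) ((m:Int) - (i+1:Int)) = 0 :=
        cNum_kneg i _ _ (by norm_num)
      rw [hz, add_zero]
      have hre : ∀ k : Nat, (((k+1:Nat)):Int) - 1 = (k:Int) := by intro k; push_cast; ring
      by_cases hm : i + 1 ≤ m
      · rw [if_pos hm, ih (m - (i+1))]
        apply Finset.sum_congr rfl
        intro k _
        rw [hre k]
        congr 1
        omega
      · rw [if_neg hm]
        apply Finset.sum_eq_zero
        intro k _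
        rw [hre k]
        exact cNum_mneg i _ _ (by omega)
    rw [h1, h2]
    rcases Nat.lt_or_ge m (i+1) with h | h
    · rw [if_neg (by omega)]
      simp [Q, Nat.not_le.mpr h]
    · rw [if_pos h]
      simp [Q, h]

-- A's sum in terms of sNum
lemma a_sum_sNum (N : Nat) (hN : 1 ≤ N) :
    ∑ i ∈ Finset.range N, Q (i+1) (N - (i+1))
      = ∑ k ∈ Finset.range (N+2), sNum ((k:Int)+1) ((N:Int)+1) := by
  have step1 : ∀ i ∈ Finset.range N, Q (i+1) (N-(i+1))
      = ∑ k ∈ Finset.range (N+2), cNum (i+1) (k:Int) ((N:Int) - ((i+1:Nat):Int)) := by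
    intro i hi
    have hi' := Finset.mem_range.mp hi
    rw [Q_eq_sum_cNum (i+1) (N-(i+1))]
    have hcast : ((N - (i+1) : Nat) : Int) = (N:Int) - ((i+1:Nat):Int) := by omega
    rw [hcast]
    have hsub : Finset.range (i+2) ⊆ Finset.range (N+2) :=
      by intro x hx; rw [Finset.mem_range] at *; omega
    apply Finset.sum_subset hsub
    intro k hk hnk
    have hik : i+1 < k := by
      rcases Nat.lt_or_ge k (i+2) with h | h
      · exact absurd (Finset.mem_range.mpr h) hnk
      · omega
    exact cNum_kbig (i+1) _ _ (by push_cast; omega)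
  rw [Finset.sum_congr rfl step1, Finset.sum_comm]
  apply Finset.sum_congr rfl
  intro k _
  have tele := cNum_tele (k:Int) N (N+1)
  rw [Finset.sum_range_succ'] at tele
  have h0 : cNum 0 (k:Int) ((N:Int) - ((0:Nat):Int)) = 0 := by
    simp only [cNum]; rw [if_neg (by push_cast; omega)]
  rw [h0, add_zero] at tele
  rw [← tele]
  rw [cNum_stab (N+1) _ _ (by omega)]

-- ---------- B side ----------

def tri : Nat → Nat
  | 0 => 0
  | (k+1) => tri k + k

lemma tri_eq (k : Nat) : 2 * tri k = k * (k-1) := by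
  induction k with
  | zero => rfl
  | succ k ih => simp only [tri]; cases k <;> [rfl; (rename_i k; simp only [Nat.add_sub_cancel] at *; ring_nf; ring_nf at ih; omega)]

def srow (N k : Nat) : List Int :=
  (List.range (N+1)).map (fun (j : Nat) => sNum (k:Int) ((j:Int) + (tri k : Int)))

lemma srow_length (N k : Nat) : (srow N k).length = N + 1 := by simp [srow]

lemma srow_getD (N k j : Nat) (h : j ≤ N) :
    (srow N k).getD j 0 = sNum (k:Int) ((j:Int) + (tri k : Int)) := by
  unfold srow
  rw [List.getD_eq_getElem?_getD, List.getElem?_map, List.getElem?_range (by omega : j < N+1)]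
  rfl

lemma srow_zero (N : Nat) : srow N 0 = 1 :: List.replicate N 0 := by
  apply List.ext_getElem (by simp [srow_length])
  intro i h1 h2
  unfold srow
  rw [List.getElem_map, List.getElem_range]
  show sNum ((0:Nat):Int) ((i:Int) + ((tri 0 : Nat):Int)) = _
  simp only [tri, Nat.cast_zero, add_zero]
  unfold sNum
  rw [cNum_zero]
  cases i with
  | zero => simp
  | succ j =>
    rw [List.getElem_cons_succ, List.getElem_replicate]
    rw [if_neg (by push_cast; omega)]

-- entries below k vanish
lemma tri_small (j k : Nat) (hj : j < k) : 2*(j + tri k) < k*(k+1) := by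
  have h2 := tri_eq k
  obtain ⟨a, rfl⟩ : ∃ a, k = a + 1 := ⟨k-1, by omega⟩
  have h3 : 2 * tri (a+1) = (a+1)*a := by rw [h2]; simp
  nlinarith

lemma srow_small (k j : Nat) (hj : j < k) :
    sNum (k:Int) ((j:Int) + (tri k : Int)) = 0 := by
  unfold sNum
  apply cNum_vanish
  have h := Int.ofNat_lt.mpr (tri_small j k hj)
  push_cast at h
  nlinarith

lemma sNum_vanish (k m : Int) (h : 2*m < k*(k+1)) : sNum k m = 0 :=
  cNum_vanish _ _ _ h

lemma sNum_one (m : Int) (h : 1 ≤ m) : sNum 1 m = 1 := by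
  unfold sNum
  rw [cNum_one, if_pos ⟨h, by omega⟩]

lemma tri_succ (k : Nat) (hk : 1 ≤ k) : tri k = tri (k-1) + (k-1) := by
  obtain ⟨a, rfl⟩ : ∃ a, k = a + 1 := ⟨k-1, by omega⟩
  simp [tri]

lemma twoShift (k : Nat) (hk : 2 ≤ k) : 2*((k-2)*(k+1)/2) = (k-2)*(k+1) := by
  obtain ⟨a, rfl⟩ : ∃ a, k = a + 2 := ⟨k-2, by omega⟩
  simp only [Nat.add_sub_cancel]
  obtain ⟨c, hc⟩ : ∃ c, a*(a+2+1) = 2*c := by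
    rcases Nat.even_or_odd a with ⟨b, hb⟩ | ⟨b, hb⟩
    · exact ⟨b*(a+3), by subst hb; ring⟩
    · exact ⟨a*(b+2), by subst hb; ring⟩
  rw [hc, Nat.mul_div_cancel_left c (by norm_num)]

-- continue-case arithmetic: (N - shift) + tri k = N + 1
lemma contArith (N k : Nat) (hk : 2 ≤ k) (hc : k ≤ N - (k-2)*(k+1)/2) :
    (N - (k-2)*(k+1)/2) + tri k = N + 1 := by
  have h1 := twoShift k hk
  have h2 := tri_eq k
  obtain ⟨a, rfl⟩ : ∃ a, k = a + 2 := ⟨k-2, by omega⟩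
  have h4 : (a+2)*(a+2-1) = (a+2)*(a+1) := by simp
  rw [h4] at h2
  have h5 : (a+2)*(a+1) = (a+2-2)*(a+2+1) + 2 := by simp; ring
  obtain ⟨P, hP1, hP2⟩ : ∃ P, 2*((a+2-2)*(a+2+1)/2) = P ∧ 2*tri (a+2) = P + 2 :=
    ⟨(a+2-2)*(a+2+1), h1, by omega⟩
  omega

-- break-case arithmetic: 2*(N+1) < k*(k+1)
lemma breakArith (N k : Nat) (hk : 2 ≤ k) (hc : N - (k-2)*(k+1)/2 < k) :
    2*(N+1) < k*(k+1) := by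
  have h1 := twoShift k hk
  obtain ⟨a, rfl⟩ : ∃ a, k = a + 2 := ⟨k-2, by omega⟩
  have h5 : (a+2)*(a+2+1) = (a+2-2)*(a+2+1) + 2*(a+2) + 2 := by simp; ring
  obtain ⟨P, hP1, hP2⟩ : ∃ P, 2*((a+2-2)*(a+2+1)/2) = P ∧ (a+2)*(a+2+1) = P + 2*(a+2) + 2 :=
    ⟨(a+2-2)*(a+2+1), h1, by omega⟩
  omega

lemma mulMono (k k' : Nat) (h : k ≤ k') : k*(k+1) ≤ k'*(k'+1) :=
  Nat.mul_le_mul h (by omega)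

-- the in-place inner loop fills the row with sNum values (shifted by tri k)
lemma bRow_inv (N k : Nat) (hk : 1 ≤ k) : ∀ t, k + t ≤ N+1 →
    (List.range' k t).foldl
      (fun row j => row.set j ((srow N (k-1)).getD (j-1) 0 + row.getD (j-k) 0))
      (List.replicate (N+1) 0)
    = (List.range (N+1)).map
        (fun (j:Nat) => if j < k+t then sNum (k:Int) ((j:Int)+(tri k:Int)) else 0) := by
  intro t
  induction t with
  | zero =>
    intro _
    simp only [List.range'_zero, List.foldl_nil]
    apply List.ext_getElem (by simp)
    intro i h1 h2
    rw [List.getElem_replicate, List.getElem_map, List.getElem_range]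
    by_cases hi : i < k + 0
    · rw [if_pos hi, srow_small k i (by omega)]
    · rw [if_neg hi]
  | succ t ih =>
    intro hle
    rw [List.range'_concat, List.foldl_append, ih (by omega)]
    simp only [List.foldl_cons, List.foldl_nil]
    rw [show k + 1*t = k + t from by ring]
    have hr1 : (srow N (k-1)).getD (k+t-1) 0
        = sNum ((k-1:Nat):Int) (((k+t-1:Nat):Int) + (tri (k-1):Int)) :=
      srow_getD N (k-1) (k+t-1) (by omega)
    have hr2 : ((List.range (N+1)).map
          (fun (j:Nat) => if j < k+t then sNum (k:Int) ((j:Int)+(tri k:Int)) else 0)).getD (k+t-k) 0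
        = sNum (k:Int) ((t:Int)+(tri k:Int)) := by
      rw [show k+t-k = t from by omega]
      rw [List.getD_eq_getElem?_getD, List.getElem?_map, List.getElem?_range (by omega : t < N+1)]
      show (if t < k + t then sNum (k:Int) ((t:Int)+(tri k:Int)) else 0) = _
      rw [if_pos (by omega : t < k+t)]
    rw [hr1, hr2]
    have hval : sNum ((k-1:Nat):Int) (((k+t-1:Nat):Int) + (tri (k-1):Int))
          + sNum (k:Int) ((t:Int)+(tri k:Int))
        = sNum (k:Int) (((k+t:Nat):Int) + (tri k:Int)) := by
      have hrec := sNum_rec (k:Int) (((k+t:Nat):Int) + (tri k:Int)) (by omega)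
      have e1 : ((k+t:Nat):Int) + (tri k:Int) - (k:Int) = (t:Int) + (tri k:Int) := by
        push_cast; ring
      have e2 : (k:Int) - 1 = ((k-1:Nat):Int) := by omega
      have e3 : (t:Int) + (tri k:Int) = ((k+t-1:Nat):Int) + (tri (k-1):Int) := by
        have := tri_succ k hk
        omega
      rw [e1, e2, e3] at hrec
      rw [hrec, e3]
      ring
    rw [hval]
    apply List.ext_getElem (by simp)
    intro i h1 h2
    rw [List.getElem_set]
    have hlen : i < N+1 := by simpa using h1
    rw [List.getElem_map, List.getElem_range, List.getElem_map, List.getElem_range]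
    by_cases hik : k + t = i
    · rw [if_pos hik, if_pos (by omega)]
      rw [← hik]
    · rw [if_neg hik]
      by_cases h : i < k+t
      · rw [if_pos h, if_pos (by omega)]
      · rw [if_neg h, if_neg (by omega)]

lemma bRow_eq (N k : Nat) (hk : 1 ≤ k) : bRow N k (srow N (k-1)) = srow N k := by
  unfold bRow
  rcases Nat.lt_or_ge k (N+2) with hkN | hkN
  · rw [bRow_inv N k hk (N+1-k) (by omega)]
    apply List.ext_getElem (by simp [srow_length])
    intro i h1 h2
    have hlen : i < N+1 := by simpa using h1
    rw [List.getElem_map, List.getElem_range]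
    unfold srow
    rw [List.getElem_map, List.getElem_range]
    rw [if_pos (by omega : i < k + (N+1-k))]
  · rw [show N+1-k = 0 from by omega]
    apply List.ext_getElem (by simp [srow_length])
    intro i h1 h2
    have hlen : i < N+1 := by simpa using h1
    show (List.replicate (N+1) (0:Int))[i] = _
    rw [List.getElem_replicate]
    unfold srow
    rw [List.getElem_map, List.getElem_range]
    rw [srow_small k i (by omega)]

lemma bLoop_eq (N : Nat) : ∀ (d k : Nat) (acc : Int), 1 ≤ k → N + 3 ≤ k + d →
    bLoop N k (srow N (k-1)) acc
      = acc + ∑ i ∈ Finset.range (N+3-k),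
          (if 2 ≤ k + i then sNum ((k+i : Nat) : Int) ((N:Int)+1) else 0) := by
  intro d
  induction d with
  | zero =>
    intro k acc hk hNd
    rw [bLoop, if_pos ⟨by omega, by omega⟩, show N+3-k = 0 from by omega]
    simp
  | succ d ih =>
    intro k acc hk hNd
    rw [bLoop]
    by_cases hbr : 2 ≤ k ∧ N - (k-2)*(k+1)/2 < k
    · rw [if_pos hbr]
      have hz : ∀ i ∈ Finset.range (N+3-k),
          (if 2 ≤ k + i then sNum ((k+i:Nat):Int) ((N:Int)+1) else 0) = 0 := by
        intro i _
        rw [if_pos (by omega)]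
        apply sNum_vanish
        have hn : 2*(N+1) < (k+i)*((k+i)+1) :=
          lt_of_lt_of_le (breakArith N k hbr.1 hbr.2) (mulMono k (k+i) (by omega))
        exact_mod_cast hn
      rw [Finset.sum_eq_zero hz]
      ring
    · rw [if_neg hbr]
      show bLoop N (k+1) (bRow N k (srow N (k-1)))
          (if 2 ≤ k then acc + (bRow N k (srow N (k-1))).getD (N - (k-2)*(k+1)/2) 0 else acc)
        = _
      rw [bRow_eq N k hk]
      have harg : k + 1 - 1 = k := by omega
      have ihk := ih (k+1)
        (if 2 ≤ k then acc + (srow N k).getD (N - (k-2)*(k+1)/2) 0 else acc)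
        (by omega) (by omega)
      rw [harg] at ihk
      rw [ihk]
      rcases Nat.lt_or_ge k 2 with hklt | hkge
      · -- k = 1: nothing is added this round, and the head term of the sum is 0
        have hk1 : k = 1 := by omega
        subst hk1
        rw [if_neg (by omega)]
        rw [show N+3-1 = (N+3-2)+1 from by omega, Finset.sum_range_succ']
        rw [if_neg (by omega : ¬ 2 ≤ 1 + 0)]
        have hcong : ∀ i ∈ Finset.range (N+3-2),
            (if 2 ≤ 1+(i+1) then sNum ((1+(i+1):Nat):Int) ((N:Int)+1) else 0)
              = (if 2 ≤ 1+1+i then sNum ((1+1+i:Nat):Int) ((N:Int)+1) else 0) := by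
          intro i _
          rw [if_pos (by omega), if_pos (by omega)]
          congr 2
          omega
        rw [Finset.sum_congr rfl hcong]
        ring
      · -- k ≥ 2: the value added this round is sNum k (N+1), the head of the sum
        rw [if_pos hkge]
        have hcont : k ≤ N - (k-2)*(k+1)/2 := Nat.le_of_not_lt (fun hh => hbr ⟨hkge, hh⟩)
        have hgd : (srow N k).getD (N - (k-2)*(k+1)/2) 0 = sNum (k:Int) ((N:Int)+1) := by
          rw [srow_getD N k _ (by omega : N - (k-2)*(k+1)/2 ≤ N)]
          congr 1
          have := contArith N k hkge hcont
          omega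
        rw [hgd]
        rw [show N+3-k = (N+3-(k+1))+1 from by omega, Finset.sum_range_succ']
        rw [if_pos (by omega : 2 ≤ k + 0)]
        have hcong : ∀ i ∈ Finset.range (N+3-(k+1)),
            (if 2 ≤ k+(i+1) then sNum ((k+(i+1):Nat):Int) ((N:Int)+1) else 0)
              = (if 2 ≤ k+1+i then sNum ((k+1+i:Nat):Int) ((N:Int)+1) else 0) := by
          intro i _
          rw [if_pos (by omega), if_pos (by omega)]
          congr 2
          omega
        rw [Finset.sum_congr rfl hcong]
        rw [show k + 0 = k from by omega]
        ring

-- ===== VERDICT (by name: the statement is the Claim_ definition above) =====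
theorem solution_spec : Claim_equal_solution := by
  intro n _ hpre
  show solution n = solution_alt n
  rw [a_value n]
  rcases eq_or_lt_of_le hpre with h0 | hpos
  · rw [← h0]
    norm_num [solution_alt]
  · set N := n.toNat with hN
    have hN1 : 1 ≤ N := by omega
    rw [a_sum_sNum N hN1]
    unfold solution_alt
    rw [if_neg (by omega)]
    rw [show (1 : Int) :: List.replicate N 0 = srow N (1-1) from (srow_zero N).symm]
    rw [bLoop_eq N (N+2) 1 1 (by omega) (by omega)]
    rw [show N+3-1 = (N+1)+1 from by omega]
    rw [show N+2 = (N+1)+1 from by omega]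
    conv_lhs => rw [Finset.sum_range_succ']
    conv_rhs => rw [Finset.sum_range_succ']
    rw [if_neg (by omega : ¬ 2 ≤ 1 + 0)]
    have h1 : sNum (((0:Nat):Int)+1) ((N:Int)+1) = 1 := by
      rw [show (((0:Nat):Int)+1) = 1 from by norm_num]
      exact sNum_one _ (by omega)
    rw [h1]
    have hcong : ∀ i ∈ Finset.range (N+1),
        (if 2 ≤ 1+(i+1) then sNum ((1+(i+1):Nat):Int) ((N:Int)+1) else 0)
          = sNum (((i+1:Nat):Int)+1) ((N:Int)+1) := by
      intro i _
      rw [if_pos (by omega)]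
      congr 1
      push_cast
      ring
    rw [Finset.sum_congr rfl hcong]
    ring
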